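-- pv_equiv track=rewrite | github.com/sisbell/agentic-reasoning-lattice | scripts/lib/claim_derivation/find_in_source.py | _normalize_with_offset_map
-- ===== SOURCE A (Python) =====
-- def _normalize_with_offset_map(text):
--     """Collapse whitespace runs to single spaces in `text`. Returns
--     (normalized_text, offset_map) where offset_map[i] is the source byte
--     offset corresponding to position i in normalized_text.
--
--     Leading/trailing whitespace in `text` is preserved positionally
--     (source-anchored) — only internal runs collapse. The first whitespace
--     char of a run maps to its source offset; subsequent whitespace chars
--     in the run are dropped.
--     """
--     out_chars = []
--     offset_map = []
--     in_ws_run = False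
--     for i, ch in enumerate(text):
--         if ch.isspace():
--             if in_ws_run:
--                 continue  # drop interior whitespace from runs
--             out_chars.append(" ")
--             offset_map.append(i)
--             in_ws_run = True
--         else:
--             out_chars.append(ch)
--             offset_map.append(i)
--             in_ws_run = False
--     return "".join(out_chars), offset_map
-- ===== SOURCE B (Python) =====
-- from itertools import groupby
--
-- def _normalize_with_offset_map(text):
--     """Collapse whitespace runs to single spaces via groupby over
--     enumerate(text); a whitespace group contributes one ' ' mapped to the
--     group's first source offset, a non-whitespace group contributes every
--     character with its own offset."""
--     out_chars = []
--     offset_map = []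
--     for is_ws, group in groupby(enumerate(text), key=lambda p: p[1].isspace()):
--         if is_ws:
--             i, _ch = next(group)
--             out_chars.append(" ")
--             offset_map.append(i)
--         else:
--             for i, ch in group:
--                 out_chars.append(ch)
--                 offset_map.append(i)
--     return "".join(out_chars), offset_map
-- ===== Notes on version B (the rewrite author's own statement) =====
-- stated objective: idiomatic
-- what changed: Replaces the manual in_ws_run flag loop by itertools.groupby over enumerate(text) keyed on isspace: each whitespace group yields a single space at its first offset, each non-whitespace group is emitted verbatim.
import Mathlib
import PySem

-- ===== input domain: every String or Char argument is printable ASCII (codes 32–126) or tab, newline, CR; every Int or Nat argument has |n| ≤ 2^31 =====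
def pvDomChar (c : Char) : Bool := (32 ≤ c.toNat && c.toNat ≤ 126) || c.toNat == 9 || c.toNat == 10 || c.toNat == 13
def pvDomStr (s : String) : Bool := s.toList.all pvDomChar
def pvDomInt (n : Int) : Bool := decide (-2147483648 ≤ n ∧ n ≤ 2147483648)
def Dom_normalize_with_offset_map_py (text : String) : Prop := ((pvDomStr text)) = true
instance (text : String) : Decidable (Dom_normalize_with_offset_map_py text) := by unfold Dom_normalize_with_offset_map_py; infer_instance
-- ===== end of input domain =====

-- B rewrites A's flag-carrying loop as grouping consecutive characters by isspace (idiomatic decomposition; same cost).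

-- ===== PORT A =====
-- the for-loop over enumerate(text) with state (out_chars, offset_map, in_ws_run)
def pvALoop : List (Int × Char) → List Char → List Int → Bool → List Char × List Int
  | [], out, offs, _ => (out, offs)
  | (i, ch) :: rest, out, offs, inWs =>
    if PySem.Chars.isspace ch then
      if inWs then
        pvALoop rest out offs inWs          -- continue: drop interior whitespace
      else
        pvALoop rest (out ++ [' ']) (offs ++ [i]) true
    else
      pvALoop rest (out ++ [ch]) (offs ++ [i]) false

def normalize_with_offset_map_py (text : String) : String × List Int :=
  let r := pvALoop (PySem.List.enumerate text.toList 0) [] [] false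
  (String.ofList r.1, r.2)

-- ===== PORT B =====
-- groupby(enumerate(text), key = isspace ∘ snd): a whitespace group is consumed
-- after its first pair (dropWhile), a non-whitespace group is emitted pair by pair.
def pvBLoop : List (Int × Char) → List Char × List Int
  | [] => ([], [])
  | (i, ch) :: rest =>
    if PySem.Chars.isspace ch then
      let r := pvBLoop (rest.dropWhile (fun p => PySem.Chars.isspace p.2))
      (' ' :: r.1, i :: r.2)
    else
      let r := pvBLoop rest
      (ch :: r.1, i :: r.2)
  termination_by l => l.length
  decreasing_by
    · exact Nat.lt_succ_of_le (List.length_dropWhile_le _ _)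
    · simp

def normalize_with_offset_map_py_alt (text : String) : String × List Int :=
  let r := pvBLoop (PySem.List.enumerate text.toList 0)
  (String.ofList r.1, r.2)

-- ===== PRECONDITION & SPEC =====
def Spec_normalize_with_offset_map_py (text : String) (out : String × List Int) : Prop := out = normalize_with_offset_map_py_alt text
instance (text : String) (out : String × List Int) : Decidable (Spec_normalize_with_offset_map_py text out) := by unfold Spec_normalize_with_offset_map_py; infer_instance

-- ===== CLAIM (what is proved, stated in full; the proofs are below) =====
def Claim_equal_normalize_with_offset_map_py : Prop := ∀ (text : String), Dom_normalize_with_offset_map_py text → Spec_normalize_with_offset_map_py text (normalize_with_offset_map_py text)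

-- ===== LEMMAS AND PROOFS =====

-- with the flag set, A keeps skipping whitespace: it behaves like starting fresh after the run
lemma pvALoop_true_dropWhile (l : List (Int × Char)) : ∀ out offs,
    pvALoop l out offs true = pvALoop (l.dropWhile (fun p => PySem.Chars.isspace p.2)) out offs false := by
  induction l with
  | nil => intro out offs; simp [pvALoop]
  | cons p rest ih =>
    intro out offs
    obtain ⟨i, ch⟩ := p
    by_cases h : PySem.Chars.isspace ch
    · simp [pvALoop, h, List.dropWhile, ih]
    · simp [pvALoop, h, List.dropWhile]

-- A's accumulator loop (flag off) produces exactly B's group recursion, appended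
lemma pvALoop_eq_pvBLoop (l : List (Int × Char)) : ∀ out offs,
    pvALoop l out offs false = (out ++ (pvBLoop l).1, offs ++ (pvBLoop l).2) := by
  induction l using pvBLoop.induct with
  | case1 => intro out offs; simp [pvALoop, pvBLoop]
  | case2 i ch rest h ih =>
    intro out offs
    simp only [pvALoop, h, if_pos, if_true, Bool.false_eq_true, if_false,
      pvALoop_true_dropWhile, ih, pvBLoop]
    simp
  | case3 i ch rest h ih =>
    intro out offs
    simp only [pvALoop, h, Bool.false_eq_true, if_false, ih, pvBLoop]
    simp

-- ===== VERDICT (by name: the statement is the Claim_ definition above) =====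
theorem normalize_with_offset_map_py_spec : Claim_equal_normalize_with_offset_map_py := by
  intro text _
  unfold Spec_normalize_with_offset_map_py normalize_with_offset_map_py normalize_with_offset_map_py_alt
  simp [pvALoop_eq_pvBLoop]
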